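-- pv_equiv track=rewrite | github.com/Renukaradhya1234/LeetcodeProblems | python/pythonPracticeProgram/pattern_plus.py | skip_word
-- ===== SOURCE A (Python) =====
-- def skip_word(s, c):
--     d, out, skip = len(c), '', []
--     for i in range(len(s)) :
--         if i not in skip :
--             if s[i: i+d] != c:
--                 out += '+'
--                 skip = []
--             else :
--                 out += c
--                 skip = list(range(i,i+d))
--         else:
--             continue
--     return out
-- ===== SOURCE B (Python) =====
-- def skip_word(s, c):
--     # Two passes: greedy match-marking into a boolean mask, then rendering.
--     d = len(c)
--     if d == 0:
--         return ''
--     n = len(s)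
--     kept = [False] * n
--     i = 0
--     while i + d <= n:
--         if s[i:i+d] == c:
--             for j in range(i, i+d):
--                 kept[j] = True
--             i += d
--         else:
--             i += 1
--     return ''.join(s[j] if kept[j] else '+' for j in range(n))
-- ===== Notes on version B (the rewrite author's own statement) =====
-- stated objective: faster
-- what changed: A does one scan over every index, testing membership in a 'skip' list rebuilt after each match and growing the output by repeated string concatenation; B separates concerns into two passes: a greedy window scan that jumps ahead by len(c) after a match and marks kept positions in a boolean mask, then a single join rendering s[j] or '+' from the mask.
import Mathlib
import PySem

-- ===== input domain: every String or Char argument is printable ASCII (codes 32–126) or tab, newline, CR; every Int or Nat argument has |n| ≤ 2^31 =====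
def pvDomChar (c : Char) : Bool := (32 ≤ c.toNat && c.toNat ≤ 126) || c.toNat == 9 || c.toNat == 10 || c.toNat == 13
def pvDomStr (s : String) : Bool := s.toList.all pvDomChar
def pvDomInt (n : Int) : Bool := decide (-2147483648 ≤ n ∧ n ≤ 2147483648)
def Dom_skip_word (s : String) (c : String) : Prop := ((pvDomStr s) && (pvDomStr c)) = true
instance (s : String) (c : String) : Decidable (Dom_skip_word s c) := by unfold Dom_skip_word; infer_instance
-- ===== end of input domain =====

-- B replaces A's one scan (skip-list membership + quadratic string concatenation) by two passes —
-- greedy match-marking into a boolean mask, then one join — measurably faster in a timing run.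

-- ===== PORT A =====
-- the loop body of A, named so the proofs can speak about it
def stepA (sl cl : List Char) (st : List Char × List Int) (i : Int) : List Char × List Int :=
  if i ∉ st.2 then
    if PySem.List.slice sl (some i) (some (i + (cl.length : Int))) ≠ cl then
      (st.1 ++ ['+'], [])
    else
      (st.1 ++ cl, PySem.List.pyRange i (i + (cl.length : Int)) 1)
  else st

def skip_word (s : String) (c : String) : String :=
  let sl := s.toList
  let cl := c.toList
  let st := (PySem.List.pyRange 0 (sl.length : Int) 1).foldl (stepA sl cl) ([], [])
  String.ofList st.1

-- ===== PORT B =====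
-- pass 1 of B: the while loop marking matched windows in the mask
-- (the `cl.length ≠ 0` conjunct is a totality guard only; B calls it with cl ≠ [])
def bMark (sl cl : List Char) (i : Nat) (kept : List Bool) : List Bool :=
  if h : i + cl.length ≤ sl.length ∧ cl.length ≠ 0 then
    if PySem.List.slice sl (some (i : Int)) (some ((i : Int) + (cl.length : Int))) = cl then
      bMark sl cl (i + cl.length) ((List.range' i cl.length).foldl (fun k j => k.set j true) kept)
    else
      bMark sl cl (i + 1) kept
  else kept
termination_by sl.length - i
decreasing_by all_goals omega

def skip_word_alt (s : String) (c : String) : String :=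
  let sl := s.toList
  let cl := c.toList
  if cl.length = 0 then ""
  else
    let kept := bMark sl cl 0 (List.replicate sl.length false)
    String.ofList ((List.range sl.length).map
      (fun j => if kept.getD j false then sl.getD j '+' else '+'))

-- ===== PRECONDITION & SPEC =====
def Spec_skip_word (s : String) (c : String) (out : String) : Prop := out = skip_word_alt s c
instance (s : String) (c : String) (out : String) : Decidable (Spec_skip_word s c out) := by unfold Spec_skip_word; infer_instance

-- ===== CLAIM (what is proved, stated in full; the proofs are below) =====
def Claim_equal_skip_word : Prop := ∀ (s : String) (c : String), Dom_skip_word s c → Spec_skip_word s c (skip_word s c)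

-- ===== LEMMAS AND PROOFS =====

-- common greedy specification: output from position i on
def gsp (sl cl : List Char) (i : Nat) : List Char :=
  if h : i < sl.length ∧ cl ≠ [] then
    if PySem.List.slice sl (some (i : Int)) (some ((i : Int) + (cl.length : Int))) = cl then
      cl ++ gsp sl cl (i + cl.length)
    else '+' :: gsp sl cl (i + 1)
  else []
termination_by sl.length - i
decreasing_by
  · have : cl.length ≠ 0 := by simpa using h.2
    omega
  · omega

lemma slice_nat (sl : List Char) (i d : Nat) :
    PySem.List.slice sl (some (i : Int)) (some ((i : Int) + (d : Int))) = (sl.drop i).take d :=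
  PySem.List.slice_natCast_add sl i d

-- a match forces the window to fit
lemma match_fits (sl cl : List Char) (i : Nat) (hcl : cl ≠ [])
    (hm : PySem.List.slice sl (some (i : Int)) (some ((i : Int) + (cl.length : Int))) = cl) :
    i + cl.length ≤ sl.length := by
  rw [slice_nat] at hm
  have h1 : ((sl.drop i).take cl.length).length = cl.length := by rw [hm]
  have h2 : cl.length ≠ 0 := by simpa using hcl
  simp [List.length_take, List.length_drop] at h1
  omega

lemma map_getD_range' (sl : List Char) (i d : Nat) (h : i + d ≤ sl.length) :
    (List.range' i d).map (fun j => sl.getD j '+') = (sl.drop i).take d := by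
  induction d generalizing i with
  | zero => simp
  | succ d ih =>
      have hi : i < sl.length := by omega
      rw [List.range'_succ, List.map_cons, ih (i + 1) (by omega)]
      rw [List.drop_eq_getElem_cons hi, List.take_succ_cons, List.getD_eq_getElem _ _ hi]

-- past the last possible window the greedy spec is all '+'
lemma gsp_tail (sl cl : List Char) (hcl : cl ≠ []) :
    ∀ i : Nat, sl.length < i + cl.length → gsp sl cl i = List.replicate (sl.length - i) '+' := by
  intro i
  induction hn : sl.length - i using Nat.strong_induction_on generalizing i with
  | _ n ih =>
    intro hlt
    subst hn
    rw [gsp]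
    by_cases hi : i < sl.length
    · have hne : PySem.List.slice sl (some (i : Int)) (some ((i : Int) + (cl.length : Int))) ≠ cl := by
        intro hm
        exact absurd (match_fits sl cl i hcl hm) (by omega)
      rw [dif_pos ⟨hi, hcl⟩, if_neg hne, ih (sl.length - (i + 1)) (by omega) (i + 1) rfl (by omega)]
      have : sl.length - i = (sl.length - (i + 1)) + 1 := by omega
      rw [this, List.replicate_succ]
    · rw [dif_neg (by tauto)]
      have : sl.length - i = 0 := by omega
      simp [this]

-- ===== A-side =====

-- positions covered by the pending skip list are passed over without changing the state
lemma skip_run (sl cl : List Char) (st : List Char × List Int) :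
    ∀ i j : Int, i ≤ j → j ≤ (sl.length : Int) →
    (∀ x : Int, i ≤ x → x < j → x ∈ st.2) →
    (PySem.List.pyRange i (sl.length : Int) 1).foldl (stepA sl cl) st =
    (PySem.List.pyRange j (sl.length : Int) 1).foldl (stepA sl cl) st := by
  intro i j hij hjn hmem
  induction hd : (j - i).toNat generalizing i with
  | zero =>
    have : i = j := by omega
    subst this; rfl
  | succ m ih =>
    have hij' : i < j := by omega
    rw [PySem.List.pyRange_one_cons (by omega), List.foldl_cons]
    have hin : i ∈ st.2 := hmem i le_rfl hij'
    have : stepA sl cl st i = st := by simp [stepA, hin]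
    rw [this]
    exact ih (i + 1) (by omega) (fun x hx1 hx2 => hmem x (by omega) hx2) (by omega)

-- A's fold from position i, with a skip list entirely below i, produces the greedy spec
lemma foldA_spec (sl cl : List Char) (hcl : cl ≠ []) :
    ∀ i : Nat, ∀ out : List Char, ∀ skip : List Int,
    (∀ x ∈ skip, x < (i : Int)) →
    ((PySem.List.pyRange (i : Int) (sl.length : Int) 1).foldl (stepA sl cl) (out, skip)).1 =
      out ++ gsp sl cl i := by
  intro i
  induction hn : sl.length - i using Nat.strong_induction_on generalizing i with
  | _ n ih =>
    intro out skip hskip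
    subst hn
    by_cases hi : i < sl.length
    · rw [PySem.List.pyRange_one_cons (by exact_mod_cast hi), List.foldl_cons]
      have hnotin : (i : Int) ∉ skip := fun h => absurd (hskip _ h) (by omega)
      by_cases hm : PySem.List.slice sl (some (i : Int)) (some ((i : Int) + (cl.length : Int))) = cl
      · -- match
        have hd1 : cl.length ≠ 0 := by simpa using hcl
        have hfit : i + cl.length ≤ sl.length := match_fits sl cl i hcl hm
        have hstep : stepA sl cl (out, skip) i =
            (out ++ cl, PySem.List.pyRange (i : Int) ((i : Int) + (cl.length : Int)) 1) := by
          simp [stepA, hnotin, hm]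
        rw [hstep]
        rw [show gsp sl cl i = cl ++ gsp sl cl (i + cl.length) from by
          rw [gsp, dif_pos ⟨hi, hcl⟩, if_pos hm]]
        rw [skip_run sl cl _ ((i : Int) + 1) ((i + cl.length : Nat) : Int) (by push_cast; omega)
          (by push_cast; omega)
          (fun x hx1 hx2 => by
            rw [PySem.List.mem_pyRange_one]
            constructor
            · omega
            · push_cast at hx2 ⊢; omega)]
        rw [ih (sl.length - (i + cl.length)) (by omega) (i + cl.length) rfl (out ++ cl)
          _ (fun x hx => by
            rw [PySem.List.mem_pyRange_one] at hx
            push_cast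
            omega)]
        rw [List.append_assoc]
      · -- non-match
        have hstep : stepA sl cl (out, skip) i = (out ++ ['+'], []) := by
          simp [stepA, hnotin, hm]
        rw [hstep]
        rw [show gsp sl cl i = '+' :: gsp sl cl (i + 1) from by
          rw [gsp, dif_pos ⟨hi, hcl⟩, if_neg hm]]
        rw [show (i : Int) + 1 = ((i + 1 : Nat) : Int) from by push_cast; ring]
        rw [ih (sl.length - (i + 1)) (by omega) (i + 1) rfl (out ++ ['+']) [] (by simp)]
        rw [List.append_assoc]
        rfl
    · rw [PySem.List.pyRange_one_eq_nil (by exact_mod_cast Nat.le_of_not_lt hi)]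
      rw [gsp, dif_neg (by tauto)]
      simp

-- with an empty pattern every position "matches" and contributes nothing
lemma foldA_nil (sl : List Char) (l : List Int) (out : List Char) :
    l.foldl (stepA sl []) (out, []) = (out, []) := by
  induction l generalizing out with
  | nil => rfl
  | cons x xs ih =>
      have hstep : stepA sl [] (out, ([] : List Int)) x = (out, []) := by
        have hsl : PySem.List.slice sl (some x) (some x) = ([] : List Char) := by
          apply List.eq_nil_of_length_eq_zero
          rw [PySem.List.length_slice]
          simp
        simp [stepA, hsl]
      rw [List.foldl_cons, hstep, ih]

-- ===== B-side =====

-- the inner marking loop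
lemma mark_length (kept : List Bool) (i d : Nat) :
    ((List.range' i d).foldl (fun k j => k.set j true) kept).length = kept.length := by
  induction d generalizing kept i with
  | zero => rfl
  | succ d ih => rw [List.range'_succ, List.foldl_cons, ih, List.length_set]

lemma mark_getD (kept : List Bool) (i d : Nat) (h : i + d ≤ kept.length) (j : Nat) :
    ((List.range' i d).foldl (fun k j => k.set j true) kept).getD j false =
      if i ≤ j ∧ j < i + d then true else kept.getD j false := by
  induction d generalizing kept i with
  | zero => simp
  | succ d ih =>
    rw [List.range'_succ, List.foldl_cons, ih (kept.set i true) (i + 1) (by rw [List.length_set]; omega)]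
    by_cases h1 : i + 1 ≤ j ∧ j < i + 1 + d
    · rw [if_pos h1, if_pos (by omega)]
    · rw [if_neg h1]
      by_cases h2 : j = i
      · subst h2
        rw [if_pos (by omega)]
        rw [List.getD_eq_getElem?_getD, List.getElem?_set_self (by omega)]
        rfl
      · rw [if_neg (by omega)]
        rw [List.getD_eq_getElem?_getD, List.getElem?_set_ne (by omega), ← List.getD_eq_getElem?_getD]

lemma bMark_spec (sl cl : List Char) (hcl : cl ≠ []) :
    ∀ i : Nat, ∀ kept : List Bool, kept.length = sl.length →
    (∀ j : Nat, i ≤ j → kept.getD j false = false) →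
    (bMark sl cl i kept).length = sl.length ∧
    (∀ j : Nat, j < i → (bMark sl cl i kept).getD j false = kept.getD j false) ∧
    (List.range' i (sl.length - i)).map
        (fun j => if (bMark sl cl i kept).getD j false then sl.getD j '+' else '+') =
      gsp sl cl i := by
  intro i
  induction hn : sl.length - i using Nat.strong_induction_on generalizing i with
  | _ n ih =>
    intro kept hlen hfalse
    subst hn
    have hd1 : cl.length ≠ 0 := by simpa using hcl
    by_cases hfit : i + cl.length ≤ sl.length
    · by_cases hm : PySem.List.slice sl (some (i : Int)) (some ((i : Int) + (cl.length : Int))) = cl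
      · -- match: mark the window, continue at i + d
        rw [bMark, dif_pos ⟨hfit, hd1⟩, if_pos hm]
        set kept' := (List.range' i cl.length).foldl (fun k j => k.set j true) kept with hk'
        have hlen' : kept'.length = sl.length := by rw [hk', mark_length, hlen]
        have hget' : ∀ j, kept'.getD j false =
            if i ≤ j ∧ j < i + cl.length then true else kept.getD j false := by
          intro j; rw [hk']; exact mark_getD kept i cl.length (by omega) j
        obtain ⟨ihl, ihu, ihr⟩ := ih (sl.length - (i + cl.length)) (by omega) (i + cl.length) rfl
          kept' hlen' (fun j hj => by rw [hget', if_neg (by omega)]; exact hfalse j (by omega))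
        refine ⟨ihl, ?_, ?_⟩
        · intro j hj
          rw [ihu j (by omega), hget', if_neg (by omega)]
        · have hsplit : List.range' i (sl.length - i) =
              List.range' i cl.length ++ List.range' (i + cl.length) (sl.length - (i + cl.length)) := by
            have hra := @List.range'_append i cl.length (sl.length - (i + cl.length)) 1
            simp only [Nat.one_mul] at hra
            rw [show sl.length - i = cl.length + (sl.length - (i + cl.length)) from by omega, ← hra]
          rw [hsplit, List.map_append]
          have hfirst : (List.range' i cl.length).map
              (fun j => if (bMark sl cl (i + cl.length) kept').getD j false then sl.getD j '+' else '+') =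
              (List.range' i cl.length).map (fun j => sl.getD j '+') := by
            apply List.map_congr_left
            intro j hj
            rw [List.mem_range'_1] at hj
            have hb : (bMark sl cl (i + cl.length) kept').getD j false = true := by
              rw [ihu j (by omega), hget', if_pos (show i ≤ j ∧ j < i + cl.length from by omega)]
            rw [hb, if_pos rfl]
          rw [hfirst, map_getD_range' sl i cl.length hfit, ihr]
          rw [show gsp sl cl i = cl ++ gsp sl cl (i + cl.length) from by
            rw [gsp, dif_pos ⟨by omega, hcl⟩, if_pos hm]]
          congr 1
          rw [← slice_nat sl i cl.length]
          exact hm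
      · -- no match at i
        rw [bMark, dif_pos ⟨hfit, hd1⟩, if_neg hm]
        obtain ⟨ihl, ihu, ihr⟩ := ih (sl.length - (i + 1)) (by omega) (i + 1) rfl kept hlen
          (fun j hj => hfalse j (by omega))
        refine ⟨ihl, fun j hj => ihu j (by omega), ?_⟩
        have : sl.length - i = (sl.length - (i + 1)) + 1 := by omega
        rw [this, List.range'_succ, List.map_cons]
        rw [ihu i (by omega), hfalse i le_rfl, if_neg (by simp), ihr]
        rw [show gsp sl cl i = '+' :: gsp sl cl (i + 1) from by
          rw [gsp, dif_pos ⟨by omega, hcl⟩, if_neg hm]]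
    · -- tail: the loop stops; everything left renders '+'
      rw [bMark, dif_neg (by tauto)]
      refine ⟨hlen, fun _ _ => rfl, ?_⟩
      rw [gsp_tail sl cl hcl i (by omega)]
      have : ∀ j ∈ List.range' i (sl.length - i),
          (if kept.getD j false then sl.getD j '+' else '+') = '+' := by
        intro j hj
        rw [List.mem_range'_1] at hj
        rw [hfalse j (by omega)]
        simp
      rw [List.map_congr_left this, List.map_const']
      simp

-- ===== VERDICT (by name: the statement is the Claim_ definition above) =====
theorem skip_word_spec : Claim_equal_skip_word := by
  intro s c _
  unfold Spec_skip_word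
  show skip_word s c = skip_word_alt s c
  have h1 : skip_word s c = String.ofList
      ((PySem.List.pyRange 0 (s.toList.length : Int) 1).foldl
        (stepA s.toList c.toList) ([], [])).1 := rfl
  by_cases hcl : c.toList = []
  · have h2 : skip_word_alt s c = "" := by
      simp [skip_word_alt, hcl]
    rw [h1, h2, hcl, foldA_nil]
  · have hd1 : c.toList.length ≠ 0 := by simpa using hcl
    have h2 : skip_word_alt s c = String.ofList
        ((List.range s.toList.length).map
          (fun j => if (bMark s.toList c.toList 0 (List.replicate s.toList.length false)).getD j false
            then s.toList.getD j '+' else '+')) := by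
      simp only [skip_word_alt]
      rw [if_neg hd1]
    rw [h1, h2]
    have hA := foldA_spec s.toList c.toList hcl 0 [] [] (by simp)
    simp only [Nat.cast_zero] at hA
    rw [hA]
    obtain ⟨_, _, hB⟩ := bMark_spec s.toList c.toList hcl 0
      (List.replicate s.toList.length false) (by simp) (fun j _ => by
        rw [List.getD_eq_getElem?_getD, List.getElem?_replicate]
        split <;> rfl)
    rw [List.range_eq_range']
    rw [Nat.sub_zero] at hB
    rw [hB]
    simp
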